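-- pv_equiv track=rewrite | github.com/marcelargarcia/HackerRank | HackerRank_AlternatingChars.py | alternatingCharacters_2
-- ===== SOURCE A (Python) =====
-- from collections import deque
--
-- def alternatingCharacters_2(s):
--     queue_s = deque(s)
--     deletions = 0
--     q = 1
--     while q < len(queue_s):
--         if queue_s[q] == queue_s[q-1]:
--             del queue_s[q] #O(n)
--             deletions = deletions + 1
--         else:
--             q = q + 1
--     return deletions
-- ===== SOURCE B (Python) =====
-- def alternatingCharacters_2(s):
--     # deletions = len(s) - number of maximal runs of equal characters
--     n = len(s)
--     runs = 0
--     i = 0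
--     while i < n:
--         runs += 1
--         c = s[i]
--         while i < n and s[i] == c:
--             i += 1
--     return n - runs
-- ===== Notes on version B (the rewrite author's own statement) =====
-- stated objective: faster
-- what changed: B partitions the string into maximal runs with a single forward scan and returns len(s) minus the number of runs, instead of A's deque scan that physically deletes each duplicate (del is O(n)) and recounts.
import Mathlib
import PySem

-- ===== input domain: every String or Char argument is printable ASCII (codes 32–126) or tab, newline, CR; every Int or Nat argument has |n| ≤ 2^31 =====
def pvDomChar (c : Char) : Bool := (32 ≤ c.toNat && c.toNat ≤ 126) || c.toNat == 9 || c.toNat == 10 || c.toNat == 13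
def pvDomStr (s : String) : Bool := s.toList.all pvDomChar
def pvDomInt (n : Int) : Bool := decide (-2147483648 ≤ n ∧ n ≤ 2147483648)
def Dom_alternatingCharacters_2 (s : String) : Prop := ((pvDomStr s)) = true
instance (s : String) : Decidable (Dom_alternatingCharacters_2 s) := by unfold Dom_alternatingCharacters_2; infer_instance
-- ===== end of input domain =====

-- B replaces A's delete-from-deque scan by a single run-partitioning pass returning len(s) - #runs.

-- ===== PORT A =====
-- A's while loop: index q into the deque; delete queue_s[q] when it equals queue_s[q-1], else advance q.
def aLoop (l : List Char) (q : Nat) (d : Int) : Int :=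
  if _h : q < l.length then
    if l[q]! = l[q-1]! then aLoop (l.eraseIdx q) q (d + 1)
    else aLoop l (q + 1) d
  else d
termination_by l.length - q
decreasing_by
  · simp [List.length_eraseIdx, *]; omega
  · omega

def alternatingCharacters_2 (s : String) : Int := aLoop s.toList 1 0

-- ===== PORT B =====
-- outer while of Source B counts one run per iteration; the inner while (skip the run) is the dropWhile
def runsCount : List Char → Nat
  | [] => 0
  | a :: rest => 1 + runsCount (rest.dropWhile (· == a))
termination_by l => l.length
decreasing_by
  have := List.length_dropWhile_le (· == a) rest
  simp only [List.length_cons]; omega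

def alternatingCharacters_2_alt (s : String) : Int :=
  (s.toList.length : Int) - (runsCount s.toList : Int)

-- ===== PRECONDITION & SPEC =====
def Spec_alternatingCharacters_2 (s : String) (out : Int) : Prop := out = alternatingCharacters_2_alt s
instance (s : String) (out : Int) : Decidable (Spec_alternatingCharacters_2 s out) := by unfold Spec_alternatingCharacters_2; infer_instance

-- ===== CLAIM (what is proved, stated in full; the proofs are below) =====
def Claim_equal_alternatingCharacters_2 : Prop := ∀ (s : String), Dom_alternatingCharacters_2 s → Spec_alternatingCharacters_2 s (alternatingCharacters_2 s)

-- ===== LEMMAS AND PROOFS =====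

-- number of adjacent equal pairs: the common characterisation of both programs' results
def pairs : List Char → Int
  | [] => 0
  | [_] => 0
  | a :: b :: t => (if a = b then 1 else 0) + pairs (b :: t)

lemma pairs_short (l : List Char) (h : l.length ≤ 1) : pairs l = 0 := by
  match l, h with
  | [], _ => rfl
  | [_], _ => rfl

lemma getBang_eq (l : List Char) (i : Nat) (h : i < l.length) : l[i]! = l[i] := by
  rw [List.getElem!_eq_getElem?_getD]; simp [h]

lemma erase_drop (l : List Char) (i : Nat) (h : i + 1 < l.length) :
    (l.eraseIdx (i+1)).drop i = l[i] :: l.drop (i+2) := by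
  rw [List.eraseIdx_eq_take_drop_succ, List.drop_append, List.drop_take]
  rw [List.length_take, Nat.min_eq_left (by omega : i+1 ≤ l.length)]
  rw [show i+1-i = 1 by omega, show i - (i+1) = 0 by omega]
  conv_lhs => rw [List.drop_eq_getElem_cons (by omega : i < l.length)]
  simp only [List.take_succ_cons, List.take_zero, List.cons_append, List.nil_append, List.drop]

lemma aLoop_eq (l : List Char) (q : Nat) (d : Int) (hq : 1 ≤ q) :
    aLoop l q d = d + pairs (l.drop (q - 1)) := by
  fun_induction aLoop l q d with
  | case1 l q d h heq ih =>
    rw [ih hq]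
    obtain ⟨i, rfl⟩ : ∃ i, q = i + 1 := ⟨q - 1, by omega⟩
    rw [show i + 1 - 1 = i by omega] at *
    rw [erase_drop l i h]
    have h1 : i < l.length := by omega
    rw [getBang_eq l (i+1) h, getBang_eq l i h1] at heq
    conv_rhs => rw [List.drop_eq_getElem_cons h1]
    conv_rhs => rw [List.drop_eq_getElem_cons (show i + 1 < l.length from h)]
    simp [pairs, heq]
    ring
  | case2 l q d h heq ih =>
    rw [ih (by omega)]
    obtain ⟨i, rfl⟩ : ∃ i, q = i + 1 := ⟨q - 1, by omega⟩
    rw [show i + 1 - 1 = i by omega] at heq ⊢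
    rw [show i + 1 + 1 - 1 = i + 1 by omega]
    have h1 : i < l.length := by omega
    rw [getBang_eq l (i+1) h, getBang_eq l i h1] at heq
    conv_rhs => rw [List.drop_eq_getElem_cons h1]
    rw [List.drop_eq_getElem_cons (show i + 1 < l.length from h)]
    simp [pairs, Ne.symm heq]
  | case3 l q d h =>
    rw [pairs_short]
    · ring
    · simp; omega

lemma pairs_cons_run (l : List Char) (a : Char) :
    pairs (a :: l) = ((l.takeWhile (· == a)).length : Int) + pairs (l.dropWhile (· == a)) := by
  induction l generalizing a with
  | nil => simp [pairs]
  | cons b t ih =>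
    by_cases hba : b = a
    · subst hba
      simp only [List.takeWhile, List.dropWhile, beq_self_eq_true]
      simp [pairs, ih b]
      ring
    · simp only [List.takeWhile, List.dropWhile,
        show (b == a) = false by simp [hba]]
      simp [pairs, Ne.symm hba]

lemma pairs_eq_sub_runs (l : List Char) :
    pairs l = (l.length : Int) - (runsCount l : Int) := by
  fun_induction runsCount l with
  | case1 => simp [pairs]
  | case2 a rest ih =>
    rw [pairs_cons_run, ih]
    have := congrArg List.length (List.takeWhile_append_dropWhile (p := (· == a)) (l := rest))
    simp only [List.length_append] at this
    simp
    omega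

-- ===== VERDICT (by name: the statement is the Claim_ definition above) =====
theorem alternatingCharacters_2_spec : Claim_equal_alternatingCharacters_2 := by
  intro s _
  unfold Spec_alternatingCharacters_2 alternatingCharacters_2 alternatingCharacters_2_alt
  rw [aLoop_eq _ _ _ le_rfl, pairs_eq_sub_runs]
  simp
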